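-- pv_equiv track=rewrite | github.com/thomaskelly05/childrens-homes-assistant-backend | services/staff_development_service.py | _build_reflection_text
-- ===== SOURCE A (Python) =====
-- def _build_reflection_text(entries):
--     parts = []
--
--     for e in entries:
--         parts.append(
--             f"""
-- Date: {e.get("created_at", "")}
--
-- Overview:
-- - Holding today: {e.get("holding_today", "")}
-- - Practice today: {e.get("practice_today", "")}
-- - Reflection today: {e.get("reflection_today", "")}
--
-- Gibbs:
-- - Description: {e.get("description", "")}
-- - Feelings: {e.get("feelings", "")}
-- - Evaluation: {e.get("evaluation", "")}
-- - Analysis: {e.get("analysis", "")}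
-- - Conclusion: {e.get("conclusion", "")}
-- - Action plan: {e.get("action_plan", "")}
--
-- PACE:
-- - Playfulness: {e.get("playfulness", "")}
-- - Acceptance: {e.get("acceptance", "")}
-- - Curiosity: {e.get("curiosity", "")}
-- - Empathy: {e.get("empathy", "")}
--
-- Leadership:
-- - Leadership style: {e.get("leadership_style", "")}
-- - Leadership reflection: {e.get("leadership_reflection", "")}
--
-- Impact:
-- - Child impact: {e.get("child_impact", "")}
-- - Team impact: {e.get("team_impact", "")}
-- - Safeguarding considerations: {e.get("safeguarding_considerations", "")}
-- - Support needed: {e.get("support_needed", "")}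
-- """
--         )
--
--     return "\n\n".join(parts)
-- ===== SOURCE B (Python) =====
-- _SECTIONS = [
--     ("Overview", [
--         ("Holding today", "holding_today"),
--         ("Practice today", "practice_today"),
--         ("Reflection today", "reflection_today"),
--     ]),
--     ("Gibbs", [
--         ("Description", "description"),
--         ("Feelings", "feelings"),
--         ("Evaluation", "evaluation"),
--         ("Analysis", "analysis"),
--         ("Conclusion", "conclusion"),
--         ("Action plan", "action_plan"),
--     ]),
--     ("PACE", [
--         ("Playfulness", "playfulness"),
--         ("Acceptance", "acceptance"),
--         ("Curiosity", "curiosity"),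
--         ("Empathy", "empathy"),
--     ]),
--     ("Leadership", [
--         ("Leadership style", "leadership_style"),
--         ("Leadership reflection", "leadership_reflection"),
--     ]),
--     ("Impact", [
--         ("Child impact", "child_impact"),
--         ("Team impact", "team_impact"),
--         ("Safeguarding considerations", "safeguarding_considerations"),
--         ("Support needed", "support_needed"),
--     ]),
-- ]
--
--
-- def _entry_block(e):
--     lines = ["", f"Date: {e.get('created_at', '')}"]
--     for header, fields in _SECTIONS:
--         lines.append("")
--         lines.append(header + ":")
--         for label, key in fields:
--             lines.append(f"- {label}: {e.get(key, '')}")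
--     return "\n".join(lines) + "\n"
--
--
-- def _build_reflection_text(entries):
--     return "\n\n".join(_entry_block(e) for e in entries)
-- ===== Notes on version B (the rewrite author's own statement) =====
-- stated objective: alternative
-- what changed: Replaces the single hard-coded f-string template with a data-driven layout: a table of (header, [(label, key)]) sections and a generic line builder that joins lines, so adding a field is a one-line table edit.
import Mathlib
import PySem

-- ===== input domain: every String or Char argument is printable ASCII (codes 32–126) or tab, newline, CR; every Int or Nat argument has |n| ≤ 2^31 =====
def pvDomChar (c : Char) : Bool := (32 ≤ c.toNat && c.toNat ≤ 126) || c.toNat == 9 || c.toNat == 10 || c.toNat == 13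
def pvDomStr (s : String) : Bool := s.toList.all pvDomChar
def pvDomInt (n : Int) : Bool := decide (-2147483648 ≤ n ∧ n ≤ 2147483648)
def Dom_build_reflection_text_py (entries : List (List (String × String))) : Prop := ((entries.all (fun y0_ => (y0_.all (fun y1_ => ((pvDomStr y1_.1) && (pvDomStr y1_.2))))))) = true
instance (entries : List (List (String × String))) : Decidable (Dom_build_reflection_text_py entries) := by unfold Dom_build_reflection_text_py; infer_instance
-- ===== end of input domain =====

-- B re-expresses A's fixed block template as a data table of sections driving one line builder
-- (objective: alternative decomposition); same output byte-for-byte, proved equal by kernel string reasoning.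

-- ===== PORT A =====
-- literal transliteration of A: the loop appends one formatted f-string block per entry, then "\n\n".join
def build_reflection_text_py (entries : List (List (String × String))) : String :=
  PySem.Str.join "\n\n"
    (entries.foldl (fun parts e =>
      parts ++ ["\nDate: " ++ PySem.Dict.getD ⟨e⟩ "created_at" ""
        ++ "\n\nOverview:\n- Holding today: " ++ PySem.Dict.getD ⟨e⟩ "holding_today" ""
        ++ "\n- Practice today: " ++ PySem.Dict.getD ⟨e⟩ "practice_today" ""
        ++ "\n- Reflection today: " ++ PySem.Dict.getD ⟨e⟩ "reflection_today" ""
        ++ "\n\nGibbs:\n- Description: " ++ PySem.Dict.getD ⟨e⟩ "description" ""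
        ++ "\n- Feelings: " ++ PySem.Dict.getD ⟨e⟩ "feelings" ""
        ++ "\n- Evaluation: " ++ PySem.Dict.getD ⟨e⟩ "evaluation" ""
        ++ "\n- Analysis: " ++ PySem.Dict.getD ⟨e⟩ "analysis" ""
        ++ "\n- Conclusion: " ++ PySem.Dict.getD ⟨e⟩ "conclusion" ""
        ++ "\n- Action plan: " ++ PySem.Dict.getD ⟨e⟩ "action_plan" ""
        ++ "\n\nPACE:\n- Playfulness: " ++ PySem.Dict.getD ⟨e⟩ "playfulness" ""
        ++ "\n- Acceptance: " ++ PySem.Dict.getD ⟨e⟩ "acceptance" ""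
        ++ "\n- Curiosity: " ++ PySem.Dict.getD ⟨e⟩ "curiosity" ""
        ++ "\n- Empathy: " ++ PySem.Dict.getD ⟨e⟩ "empathy" ""
        ++ "\n\nLeadership:\n- Leadership style: " ++ PySem.Dict.getD ⟨e⟩ "leadership_style" ""
        ++ "\n- Leadership reflection: " ++ PySem.Dict.getD ⟨e⟩ "leadership_reflection" ""
        ++ "\n\nImpact:\n- Child impact: " ++ PySem.Dict.getD ⟨e⟩ "child_impact" ""
        ++ "\n- Team impact: " ++ PySem.Dict.getD ⟨e⟩ "team_impact" ""
        ++ "\n- Safeguarding considerations: " ++ PySem.Dict.getD ⟨e⟩ "safeguarding_considerations" ""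
        ++ "\n- Support needed: " ++ PySem.Dict.getD ⟨e⟩ "support_needed" ""
        ++ "\n"]) [])

-- ===== PORT B =====
-- the layout as data: (section header, [(label, key), …]) pairs
def pvSections : List (String × List (String × String)) :=
  [("Overview", [("Holding today", "holding_today"), ("Practice today", "practice_today"),
                 ("Reflection today", "reflection_today")]),
   ("Gibbs", [("Description", "description"), ("Feelings", "feelings"), ("Evaluation", "evaluation"),
              ("Analysis", "analysis"), ("Conclusion", "conclusion"), ("Action plan", "action_plan")]),
   ("PACE", [("Playfulness", "playfulness"), ("Acceptance", "acceptance"), ("Curiosity", "curiosity"),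
             ("Empathy", "empathy")]),
   ("Leadership", [("Leadership style", "leadership_style"),
                   ("Leadership reflection", "leadership_reflection")]),
   ("Impact", [("Child impact", "child_impact"), ("Team impact", "team_impact"),
               ("Safeguarding considerations", "safeguarding_considerations"),
               ("Support needed", "support_needed")])]

def pvEntryBlock (e : List (String × String)) : String :=
  PySem.Str.join "\n"
    (["", "Date: " ++ PySem.Dict.getD ⟨e⟩ "created_at" ""] ++
      pvSections.flatMap (fun sec =>
        ["", sec.1 ++ ":"] ++ sec.2.map (fun f => "- " ++ f.1 ++ ": " ++ PySem.Dict.getD ⟨e⟩ f.2 "")))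
    ++ "\n"

def build_reflection_text_py_alt (entries : List (List (String × String))) : String :=
  PySem.Str.join "\n\n" (entries.map pvEntryBlock)

-- ===== PRECONDITION & SPEC =====
def Spec_build_reflection_text_py (entries : List (List (String × String))) (out : String) : Prop := out = build_reflection_text_py_alt entries
instance (entries : List (List (String × String))) (out : String) : Decidable (Spec_build_reflection_text_py entries out) := by unfold Spec_build_reflection_text_py; infer_instance

-- ===== CLAIM (what is proved, stated in full; the proofs are below) =====
def Claim_equal_build_reflection_text_py : Prop := ∀ (entries : List (List (String × String))), Dom_build_reflection_text_py entries → Spec_build_reflection_text_py entries (build_reflection_text_py entries)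

-- ===== LEMMAS AND PROOFS =====

-- B's table-driven block equals A's template block, per entry, byte for byte
set_option maxRecDepth 4096 in
theorem pvEntryBlock_eq (e : List (String × String)) :
    pvEntryBlock e =
      "\nDate: " ++ PySem.Dict.getD ⟨e⟩ "created_at" ""
        ++ "\n\nOverview:\n- Holding today: " ++ PySem.Dict.getD ⟨e⟩ "holding_today" ""
        ++ "\n- Practice today: " ++ PySem.Dict.getD ⟨e⟩ "practice_today" ""
        ++ "\n- Reflection today: " ++ PySem.Dict.getD ⟨e⟩ "reflection_today" ""
        ++ "\n\nGibbs:\n- Description: " ++ PySem.Dict.getD ⟨e⟩ "description" ""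
        ++ "\n- Feelings: " ++ PySem.Dict.getD ⟨e⟩ "feelings" ""
        ++ "\n- Evaluation: " ++ PySem.Dict.getD ⟨e⟩ "evaluation" ""
        ++ "\n- Analysis: " ++ PySem.Dict.getD ⟨e⟩ "analysis" ""
        ++ "\n- Conclusion: " ++ PySem.Dict.getD ⟨e⟩ "conclusion" ""
        ++ "\n- Action plan: " ++ PySem.Dict.getD ⟨e⟩ "action_plan" ""
        ++ "\n\nPACE:\n- Playfulness: " ++ PySem.Dict.getD ⟨e⟩ "playfulness" ""
        ++ "\n- Acceptance: " ++ PySem.Dict.getD ⟨e⟩ "acceptance" ""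
        ++ "\n- Curiosity: " ++ PySem.Dict.getD ⟨e⟩ "curiosity" ""
        ++ "\n- Empathy: " ++ PySem.Dict.getD ⟨e⟩ "empathy" ""
        ++ "\n\nLeadership:\n- Leadership style: " ++ PySem.Dict.getD ⟨e⟩ "leadership_style" ""
        ++ "\n- Leadership reflection: " ++ PySem.Dict.getD ⟨e⟩ "leadership_reflection" ""
        ++ "\n\nImpact:\n- Child impact: " ++ PySem.Dict.getD ⟨e⟩ "child_impact" ""
        ++ "\n- Team impact: " ++ PySem.Dict.getD ⟨e⟩ "team_impact" ""
        ++ "\n- Safeguarding considerations: " ++ PySem.Dict.getD ⟨e⟩ "safeguarding_considerations" ""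
        ++ "\n- Support needed: " ++ PySem.Dict.getD ⟨e⟩ "support_needed" ""
        ++ "\n" := by
  unfold pvEntryBlock pvSections
  rw [← String.toList_inj]
  simp [PySem.Str.join, PySem.Chars.join, List.intercalate, List.intersperse, String.toList_append]

-- ===== VERDICT (by name: the statement is the Claim_ definition above) =====
theorem build_reflection_text_py_spec : Claim_equal_build_reflection_text_py := by
  intro entries _
  show build_reflection_text_py entries = build_reflection_text_py_alt entries
  unfold build_reflection_text_py build_reflection_text_py_alt
  rw [PySem.List.foldl_append_singleton_eq_map, List.nil_append]
  exact congrArg (PySem.Str.join "\n\n") (List.map_congr_left fun e _ => (pvEntryBlock_eq e).symm)
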